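-- pv_equiv track=rewrite | github.com/Itogab/tp_sintaxis_lexer | Automatas/OperadorRel.py | automata_relop
-- ===== SOURCE A (Python) =====
-- ESTADO_FINAL = "ESTADO FINAL"
--
-- ESTADO_NO_FINAL = "NO ACEPTADO"
--
-- ESTADO_TRAMPA = "EN ESTADO TRAMPA"
--
-- def automata_relop(lexema):
--     estado = 0
--     estados_finales = [1,2,3,4]
--     delta = {
--         0:{'<':1,'>':2,'=':3},
--         1:{'=':3,'>':4},
--         2:{'=':3},
--         3:{},
--         4:{}
--     }
--
--     for caracter in lexema:
--         if estado in delta and caracter in delta[estado]: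
--             estado = delta[estado][caracter]
--         else:
--             estado = -1
--             break
--
--     if estado == -1:
--         return ESTADO_TRAMPA
--     if estado in estados_finales:
--         return ESTADO_FINAL
--     else:
--         return ESTADO_NO_FINAL
-- ===== SOURCE B (Python) =====
-- ESTADO_FINAL = "ESTADO FINAL"
-- ESTADO_NO_FINAL = "NO ACEPTADO"
-- ESTADO_TRAMPA = "EN ESTADO TRAMPA"
--
-- def automata_relop(lexema):
--     if lexema in ("<", ">", "=", "<=", ">=", "<>"):
--         return ESTADO_FINAL
--     if lexema == "":
--         return ESTADO_NO_FINAL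
--     return ESTADO_TRAMPA
-- ===== Notes on version B (the rewrite author's own statement) =====
-- stated objective: simpler
-- what changed: Replaced the per-character DFA transition loop with a direct whole-string classification: member of the six relational operators -> final, empty string -> non-final, anything else -> trap.
import Mathlib
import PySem

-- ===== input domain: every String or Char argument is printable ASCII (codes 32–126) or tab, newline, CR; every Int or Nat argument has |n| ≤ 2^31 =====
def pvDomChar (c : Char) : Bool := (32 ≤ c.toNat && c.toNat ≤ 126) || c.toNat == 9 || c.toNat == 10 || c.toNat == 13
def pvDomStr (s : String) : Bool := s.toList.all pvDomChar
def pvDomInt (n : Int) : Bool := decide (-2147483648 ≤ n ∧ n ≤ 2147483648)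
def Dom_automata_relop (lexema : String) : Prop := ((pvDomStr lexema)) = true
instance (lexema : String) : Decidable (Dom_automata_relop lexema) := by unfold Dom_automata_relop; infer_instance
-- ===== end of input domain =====

-- B replaces A's per-character DFA transition loop by a direct whole-string classification (simpler).


-- module-level constants shared by both versions
def ESTADO_FINAL : String := "ESTADO FINAL"
def ESTADO_NO_FINAL : String := "NO ACEPTADO"
def ESTADO_TRAMPA : String := "EN ESTADO TRAMPA"

-- ===== PORT A =====
-- the literal `delta` dict of A
def relopDelta : PySem.Dict Int (PySem.Dict Char Int) :=
  PySem.Dict.ofList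
    [ (0, PySem.Dict.ofList [('<', 1), ('>', 2), ('=', 3)]),
      (1, PySem.Dict.ofList [('=', 3), ('>', 4)]),
      (2, PySem.Dict.ofList [('=', 3)]),
      (3, PySem.Dict.ofList []),
      (4, PySem.Dict.ofList []) ]

-- A's `for caracter in lexema` loop; `estado = -1; break` is returning -1 at once
-- (`estado in delta and caracter in delta[estado]` is exactly the nested get? matches)
def relopLoop (estado : Int) (cs : List Char) : Int :=
  match cs with
  | [] => estado
  | caracter :: rest =>
    match relopDelta.get? estado with
    | none => -1
    | some row =>
      match row.get? caracter with
      | none => -1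
      | some s' => relopLoop s' rest

def automata_relop (lexema : String) : String :=
  let estados_finales : List Int := [1, 2, 3, 4]
  let estado := relopLoop 0 lexema.toList
  if estado = -1 then ESTADO_TRAMPA
  else if estado ∈ estados_finales then ESTADO_FINAL
  else ESTADO_NO_FINAL

-- ===== PORT B =====
def automata_relop_alt (lexema : String) : String :=
  if lexema ∈ (["<", ">", "=", "<=", ">=", "<>"] : List String) then ESTADO_FINAL
  else if lexema = "" then ESTADO_NO_FINAL
  else ESTADO_TRAMPA

-- ===== PRECONDITION & SPEC =====
def Spec_automata_relop (lexema : String) (out : String) : Prop := out = automata_relop_alt lexema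
instance (lexema : String) (out : String) : Decidable (Spec_automata_relop lexema out) := by unfold Spec_automata_relop; infer_instance

-- ===== CLAIM (what is proved, stated in full; the proofs are below) =====
def Claim_equal_automata_relop : Prop := ∀ (lexema : String), Dom_automata_relop lexema → Spec_automata_relop lexema (automata_relop lexema)

-- ===== LEMMAS AND PROOFS =====

-- the successful transitions of A's DFA, by computation
theorem step0_lt (rest : List Char) : relopLoop 0 ('<' :: rest) = relopLoop 1 rest := rfl
theorem step0_gt (rest : List Char) : relopLoop 0 ('>' :: rest) = relopLoop 2 rest := rfl
theorem step0_eq (rest : List Char) : relopLoop 0 ('=' :: rest) = relopLoop 3 rest := rfl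
theorem step1_eq (rest : List Char) : relopLoop 1 ('=' :: rest) = relopLoop 3 rest := rfl
theorem step1_gt (rest : List Char) : relopLoop 1 ('>' :: rest) = relopLoop 4 rest := rfl
theorem step2_eq (rest : List Char) : relopLoop 2 ('=' :: rest) = relopLoop 3 rest := rfl

-- the missing transitions: any other character traps
theorem relopLoop_zero_other {c : Char} (rest : List Char)
    (h1 : c ≠ '<') (h2 : c ≠ '>') (h3 : c ≠ '=') : relopLoop 0 (c :: rest) = -1 := by
  have h0 : relopDelta.get? 0 = some (PySem.Dict.mk [('<', 1), ('>', 2), ('=', 3)]) := rfl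
  simp only [relopLoop, h0]
  simp [PySem.Dict.get?, Ne.symm h1, Ne.symm h2, Ne.symm h3]

theorem relopLoop_one_other {c : Char} (rest : List Char)
    (hgt : c ≠ '>') (heq : c ≠ '=') : relopLoop 1 (c :: rest) = -1 := by
  have h0 : relopDelta.get? 1 = some (PySem.Dict.mk [('=', 3), ('>', 4)]) := rfl
  simp only [relopLoop, h0]
  simp [PySem.Dict.get?, Ne.symm hgt, Ne.symm heq]

theorem relopLoop_two_other {c : Char} (rest : List Char)
    (heq : c ≠ '=') : relopLoop 2 (c :: rest) = -1 := by
  have h0 : relopDelta.get? 2 = some (PySem.Dict.mk [('=', 3)]) := rfl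
  simp only [relopLoop, h0]
  simp [PySem.Dict.get?, Ne.symm heq]

theorem relopLoop_three (c : Char) (rest : List Char) : relopLoop 3 (c :: rest) = -1 := by
  have h0 : relopDelta.get? 3 = some (PySem.Dict.mk []) := rfl
  simp only [relopLoop, h0]
  simp [PySem.Dict.get?]

theorem relopLoop_four (c : Char) (rest : List Char) : relopLoop 4 (c :: rest) = -1 := by
  have h0 : relopDelta.get? 4 = some (PySem.Dict.mk []) := rfl
  simp only [relopLoop, h0]
  simp [PySem.Dict.get?]

-- B's membership test and empty test, read on the character list
theorem mem_ops_iff (s : String) :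
    s ∈ (["<", ">", "=", "<=", ">=", "<>"] : List String) ↔
      s.toList ∈ ([['<'], ['>'], ['='], ['<', '='], ['>', '='], ['<', '>']] : List (List Char)) := by
  simp only [List.mem_cons, List.not_mem_nil, or_false, String.ext_iff]
  rfl

theorem eq_empty_iff (s : String) : s = "" ↔ s.toList = ([] : List Char) := by
  rw [String.ext_iff]
  have hnil : "".toList = ([] : List Char) := by decide
  rw [hnil]

theorem automata_relop_eq_alt (lexema : String) :
    automata_relop lexema = automata_relop_alt lexema := by
  unfold automata_relop automata_relop_alt
  simp only [mem_ops_iff, eq_empty_iff]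
  match h : lexema.toList with
  | [] => simp [relopLoop]
  | [c] =>
    rcases eq_or_ne c '<' with rfl | h1
    · decide
    rcases eq_or_ne c '>' with rfl | h2
    · decide
    rcases eq_or_ne c '=' with rfl | h3
    · decide
    · simp [relopLoop_zero_other _ h1 h2 h3, h1, h2, h3]
  | [c, d] =>
    rcases eq_or_ne c '<' with rfl | h1
    · rcases eq_or_ne d '=' with rfl | h4
      · decide
      rcases eq_or_ne d '>' with rfl | h5
      · decide
      · simp [step0_lt, relopLoop_one_other _ h5 h4, h4, h5]
    rcases eq_or_ne c '>' with rfl | h2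
    · rcases eq_or_ne d '=' with rfl | h4
      · decide
      · simp [step0_gt, relopLoop_two_other _ h4, h4]
    rcases eq_or_ne c '=' with rfl | h3
    · simp [step0_eq, relopLoop_three]
    · simp [relopLoop_zero_other _ h1 h2 h3, h1, h2, h3]
  | c :: d :: e :: rest =>
    -- three or more characters: every path of the DFA traps
    have trap : relopLoop 0 (c :: d :: e :: rest) = -1 := by
      rcases eq_or_ne c '<' with rfl | h1
      · rw [step0_lt]
        rcases eq_or_ne d '=' with rfl | h4
        · rw [step1_eq]; exact relopLoop_three _ _
        rcases eq_or_ne d '>' with rfl | h5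
        · rw [step1_gt]; exact relopLoop_four _ _
        · exact relopLoop_one_other _ h5 h4
      rcases eq_or_ne c '>' with rfl | h2
      · rw [step0_gt]
        rcases eq_or_ne d '=' with rfl | h4
        · rw [step2_eq]; exact relopLoop_three _ _
        · exact relopLoop_two_other _ h4
      rcases eq_or_ne c '=' with rfl | h3
      · rw [step0_eq]; exact relopLoop_three _ _
      · exact relopLoop_zero_other _ h1 h2 h3
    simp [trap]

-- ===== VERDICT (by name: the statement is the Claim_ definition above) =====
theorem automata_relop_spec : Claim_equal_automata_relop := by
  intro lexema _
  exact automata_relop_eq_alt lexema
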